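-- pv_equiv track=rewrite | github.com/keerthivasanrk/GFG | Difficulty: Medium/Power Of Numbers/power-of-numbers.py | reverseexponentiation
-- ===== SOURCE A (Python) =====
-- def reverseexponentiation(n):
--     # code here
--     rev = 0
--     o=n
--
--     while n > 0:
--         rev = rev * 10 + (n % 10)
--         n //= 10
--     rev = o**rev
--     return rev
-- ===== SOURCE B (Python) =====
-- def reverseexponentiation(n):
--     # Build the reversed number most-significant-digit-first by recursion on
--     # the leading digits, tracking the power of ten alongside.
--     def rev_pow(m):
--         if m < 10:
--             return m, 10
--         r, p = rev_pow(m // 10)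
--         return (m % 10) * p + r, 10 * p
--
--     rev = rev_pow(n)[0] if n > 0 else 0
--     return n ** rev
-- ===== Notes on version B (the rewrite author's own statement) =====
-- stated objective: alternative
-- what changed: Replaces A's iterative Horner-style accumulation (rev = rev*10 + n%10 while chopping n) with a recursion on the leading digits that builds the reversed number most-significant-digit-first, returning (reversed value, power of ten) pairs.
import Mathlib
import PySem

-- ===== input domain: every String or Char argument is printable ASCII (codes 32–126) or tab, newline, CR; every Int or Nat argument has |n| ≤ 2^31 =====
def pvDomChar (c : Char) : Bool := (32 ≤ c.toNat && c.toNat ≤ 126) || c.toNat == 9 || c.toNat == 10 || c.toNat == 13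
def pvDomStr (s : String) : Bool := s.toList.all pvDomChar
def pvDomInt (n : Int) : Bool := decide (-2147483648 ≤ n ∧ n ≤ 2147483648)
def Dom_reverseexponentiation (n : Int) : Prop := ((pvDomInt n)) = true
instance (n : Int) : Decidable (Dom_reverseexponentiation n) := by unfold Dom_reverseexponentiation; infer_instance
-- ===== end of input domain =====

-- B rebuilds the reversed number most-significant-digit-first by a recursion that
-- tracks the power of ten, instead of A's iterative Horner accumulation (objective: alternative).

-- ===== PORT A =====
-- the while loop: rev = rev*10 + n%10; n //= 10  while n > 0
def pvALoop (n rev : Int) : Int :=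
  if 0 < n then pvALoop (PySem.Int.floordiv n 10) (rev * 10 + PySem.Int.mod n 10) else rev
termination_by n.toNat
decreasing_by
  rw [PySem.Int.floordiv_eq_ediv_of_pos (by norm_num : (0:Int) < 10)]
  omega

-- the loop's rev stays ≥ 0 (it starts at 0 and each step is rev*10 + n%10 with n%10 ≥ 0),
-- so Python's `o ** rev` is integer power: `.toNat` on the provably nonnegative exponent is exact.
def reverseexponentiation (n : Int) : Int := n ^ (pvALoop n 0).toNat

-- ===== PORT B =====
-- rev_pow m = (reversed digits of m, 10 ** number of digits of m), recursion on m // 10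
def pvRevPow (m : Int) : Int × Int :=
  if m < 10 then (m, 10)
  else
    let rp := pvRevPow (PySem.Int.floordiv m 10)
    ((PySem.Int.mod m 10) * rp.2 + rp.1, 10 * rp.2)
termination_by m.toNat
decreasing_by
  rw [PySem.Int.floordiv_eq_ediv_of_pos (by norm_num : (0:Int) < 10)]
  omega

-- as in A, the exponent is provably nonnegative, so `.toNat` is exact for Python's `**`
def reverseexponentiation_alt (n : Int) : Int :=
  n ^ (if 0 < n then (pvRevPow n).1 else 0).toNat

-- ===== PRECONDITION & SPEC =====
def Spec_reverseexponentiation (n : Int) (out : Int) : Prop := out = reverseexponentiation_alt n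
instance (n : Int) (out : Int) : Decidable (Spec_reverseexponentiation n out) := by unfold Spec_reverseexponentiation; infer_instance

-- ===== CLAIM (what is proved, stated in full; the proofs are below) =====
def Claim_equal_reverseexponentiation : Prop := ∀ (n : Int), Dom_reverseexponentiation n → Spec_reverseexponentiation n (reverseexponentiation n)

-- ===== LEMMAS AND PROOFS =====

-- the loop, started at any accumulator rev, computes rev * 10^digits + reversed(m)
theorem pvALoop_eq_revPow (k : Nat) (m rev : Int) (hk : m.toNat ≤ k) (hm : 0 < m) :
    pvALoop m rev = rev * (pvRevPow m).2 + (pvRevPow m).1 := by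
  induction k generalizing m rev with
  | zero => omega
  | succ k ih =>
    rw [pvALoop, if_pos hm, pvRevPow]
    rw [PySem.Int.floordiv_eq_ediv_of_pos (by norm_num : (0:Int) < 10),
        PySem.Int.mod_eq_emod_of_pos (by norm_num : (0:Int) < 10)]
    by_cases h10 : m < 10
    · rw [if_pos h10]
      have h0 : m / 10 = 0 := by omega
      have hmod : m % 10 = m := by omega
      rw [h0, hmod, pvALoop]
      simp
    · rw [if_neg h10]
      have hq : 0 < m / 10 := by omega
      have hqk : (m / 10).toNat ≤ k := by omega
      rw [ih (m / 10) (rev * 10 + m % 10) hqk hq]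
      simp only
      ring

-- ===== VERDICT (by name: the statement is the Claim_ definition above) =====
theorem reverseexponentiation_spec : Claim_equal_reverseexponentiation := by
  intro n _
  unfold Spec_reverseexponentiation reverseexponentiation reverseexponentiation_alt
  by_cases hn : 0 < n
  · rw [if_pos hn, pvALoop_eq_revPow n.toNat n 0 le_rfl hn]
    ring_nf
  · rw [if_neg hn, pvALoop, if_neg hn]
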